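-- pv_equiv track=rewrite | github.com/google/qwix | qwix/contrib/hijax/hiqarray_common.py | _get_quant_shape
-- ===== SOURCE A (Python) =====
-- def _get_quant_shape(
--     intermediate_shape: tuple[int, ...],
--     tiled_reduction_axes: tuple[int, ...],
--     full_reduction_axes: tuple[int, ...],
-- ) -> tuple[int, ...]:
--   """Returns the shape of the tensor after quantization."""
--   tmp_shape = []
--   for i, xi in enumerate(intermediate_shape):
--     if i in tiled_reduction_axes:
--       continue
--     else:
--       tmp_shape.append(xi)
--   out = []
--
--   for i, xi in enumerate(tmp_shape):
--     if i in full_reduction_axes: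
--       out.append(1)
--     else:
--       out.append(xi)
--   return tuple(out)
-- ===== SOURCE B (Python) =====
-- def _get_quant_shape(
--     intermediate_shape,
--     tiled_reduction_axes,
--     full_reduction_axes,
-- ):
--   """Returns the shape of the tensor after quantization.
--
--   Closed-form: each kept original index i maps to its post-removal position
--   i - rank(i), where rank(i) is the number of distinct in-range tiled axes
--   below i; no intermediate list and no sequential counter.
--   """
--   n = len(intermediate_shape)
--   tiled = {t for t in tiled_reduction_axes if 0 <= t < n}
--   full = set(full_reduction_axes)
--   return tuple(
--       1 if i - sum(1 for t in tiled if t < i) in full else intermediate_shape[i]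
--       for i in range(n) if i not in tiled)
-- ===== Notes on version B (the rewrite author's own statement) =====
-- stated objective: alternative
-- what changed: Replaced A's two sequential passes (build an intermediate tmp_shape list, then rescan it with fresh indices) by a closed-form index map: build the set of distinct in-range tiled axes and the set of full axes once, then for each kept original index i compute its output position directly as i - rank(i), where rank(i) counts distinct tiled axes below i.
import Mathlib
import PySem

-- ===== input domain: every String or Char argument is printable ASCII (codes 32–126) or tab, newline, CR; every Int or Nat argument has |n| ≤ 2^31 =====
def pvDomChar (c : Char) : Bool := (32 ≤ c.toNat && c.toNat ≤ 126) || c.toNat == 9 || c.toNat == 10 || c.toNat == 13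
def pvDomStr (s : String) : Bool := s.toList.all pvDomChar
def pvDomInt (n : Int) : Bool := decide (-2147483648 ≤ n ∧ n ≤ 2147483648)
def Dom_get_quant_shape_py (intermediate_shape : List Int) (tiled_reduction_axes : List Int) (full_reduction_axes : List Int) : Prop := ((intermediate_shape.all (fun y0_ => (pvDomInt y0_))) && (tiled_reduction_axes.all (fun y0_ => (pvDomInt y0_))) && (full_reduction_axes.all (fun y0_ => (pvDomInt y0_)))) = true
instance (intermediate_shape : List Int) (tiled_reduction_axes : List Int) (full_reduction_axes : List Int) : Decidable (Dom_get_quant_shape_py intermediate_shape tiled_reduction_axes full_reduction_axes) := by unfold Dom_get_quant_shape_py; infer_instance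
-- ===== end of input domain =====

-- B replaces A's two sequential passes (build tmp_shape, then rescan it) by a closed-form index map:
-- each kept index i lands at output position i - rank(i), rank(i) = #distinct in-range tiled axes below i; objective: alternative.

-- ===== PORT A =====
-- literal transliteration: first pass builds tmp_shape, second pass rescans it
def get_quant_shape_py (intermediate_shape : List Int) (tiled_reduction_axes : List Int) (full_reduction_axes : List Int) : List Int :=
  let tmp_shape := (PySem.List.enumerate intermediate_shape).foldl
    (fun acc p => if p.1 ∈ tiled_reduction_axes then acc else acc ++ [p.2]) []
  (PySem.List.enumerate tmp_shape).foldl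
    (fun acc p => if p.1 ∈ full_reduction_axes then acc ++ [1] else acc ++ [p.2]) []

-- ===== PORT B =====
-- {t for t in tiled_reduction_axes if 0 <= t < n}
def pvTiledSet (intermediate_shape : List Int) (tiled_reduction_axes : List Int) : PySem.Set Int :=
  PySem.Set.ofList (tiled_reduction_axes.filter
    (fun x => decide (0 ≤ x) && decide (x < (intermediate_shape.length : Int))))

-- closed-form: filter tiled indices out of range(n); map each kept i via its rank i - |{x ∈ tiled : x < i}|
def get_quant_shape_py_alt (intermediate_shape : List Int) (tiled_reduction_axes : List Int) (full_reduction_axes : List Int) : List Int :=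
  let tiled := pvTiledSet intermediate_shape tiled_reduction_axes
  let full : PySem.Set Int := PySem.Set.ofList full_reduction_axes
  ((PySem.List.pyRange 0 (intermediate_shape.length : Int) 1).filter
      (fun i => !(PySem.Set.contains tiled i))).map
    (fun i =>
      if PySem.Set.contains full (i - ((tiled.filter (fun x => decide (x < i))).length : Int))
      then 1 else PySem.List.pyGetD intermediate_shape i 0)

-- ===== PRECONDITION & SPEC =====
def Spec_get_quant_shape_py (intermediate_shape : List Int) (tiled_reduction_axes : List Int) (full_reduction_axes : List Int) (out : List Int) : Prop := out = get_quant_shape_py_alt intermediate_shape tiled_reduction_axes full_reduction_axes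
instance (intermediate_shape : List Int) (tiled_reduction_axes : List Int) (full_reduction_axes : List Int) (out : List Int) : Decidable (Spec_get_quant_shape_py intermediate_shape tiled_reduction_axes full_reduction_axes out) := by unfold Spec_get_quant_shape_py; infer_instance

-- ===== CLAIM (what is proved, stated in full; the proofs are below) =====
def Claim_equal_get_quant_shape_py : Prop := ∀ (intermediate_shape : List Int) (tiled_reduction_axes : List Int) (full_reduction_axes : List Int), Dom_get_quant_shape_py intermediate_shape tiled_reduction_axes full_reduction_axes → Spec_get_quant_shape_py intermediate_shape tiled_reduction_axes full_reduction_axes (get_quant_shape_py intermediate_shape tiled_reduction_axes full_reduction_axes)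

-- ===== LEMMAS AND PROOFS =====

-- functional form of A's first pass
def pvFilt (t : List Int) : List Int → Int → List Int
  | [], _ => []
  | x :: xs, i => if i ∈ t then pvFilt t xs (i+1) else x :: pvFilt t xs (i+1)

-- functional form of A's second pass
def pvMp (f : List Int) : List Int → Int → List Int
  | [], _ => []
  | x :: xs, j => (if j ∈ f then 1 else x) :: pvMp f xs (j+1)

-- fused counter recursion: the bridge between A's two passes and B's closed form
def pvGo (t f : List Int) : List Int → Int → Int → List Int
  | [], _, _ => []
  | x :: xs, i, j =>
    if i ∈ t then pvGo t f xs (i+1) j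
    else (if j ∈ f then 1 else x) :: pvGo t f xs (i+1) (j+1)

theorem foldl_filt (t : List Int) (s : List Int) (i : Int) (acc : List Int) :
    (PySem.List.enumerate s i).foldl
      (fun acc p => if p.1 ∈ t then acc else acc ++ [p.2]) acc = acc ++ pvFilt t s i := by
  induction s generalizing i acc with
  | nil => simp [PySem.List.enumerate_nil, pvFilt]
  | cons x xs ih =>
    simp only [PySem.List.enumerate_cons, List.foldl_cons, pvFilt]
    by_cases h : i ∈ t <;> simp [h, ih]

theorem foldl_mp (f : List Int) (l : List Int) (j : Int) (acc : List Int) :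
    (PySem.List.enumerate l j).foldl
      (fun acc p => if p.1 ∈ f then acc ++ [1] else acc ++ [p.2]) acc = acc ++ pvMp f l j := by
  induction l generalizing j acc with
  | nil => simp [PySem.List.enumerate_nil, pvMp]
  | cons x xs ih =>
    simp only [PySem.List.enumerate_cons, List.foldl_cons, pvMp]
    by_cases h : j ∈ f <;> simp [h, ih]

theorem mp_filt_eq_go (t f : List Int) (s : List Int) (i j : Int) :
    pvMp f (pvFilt t s i) j = pvGo t f s i j := by
  induction s generalizing i j with
  | nil => simp [pvFilt, pvMp, pvGo]
  | cons x xs ih =>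
    by_cases h : i ∈ t <;> simp [pvFilt, pvMp, pvGo, h, ih]

-- membership in the tiled set agrees with membership in the raw list on in-range indices
theorem mem_tiledSet (s t : List Int) (i : Int) (h0 : 0 ≤ i) (h1 : i < (s.length : Int)) :
    i ∈ pvTiledSet s t ↔ i ∈ t := by
  simp [pvTiledSet, PySem.Set.mem_ofList, List.mem_filter, h0, h1]

-- rank step: with T nodup, |{x ∈ T : x < k+1}| = |{x ∈ T : x < k}| + [k ∈ T]
theorem rank_step (T : List Int) (hnd : T.Nodup) (k : Int) :
    (T.filter (fun x => decide (x < k + 1))).length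
      = (T.filter (fun x => decide (x < k))).length + (if k ∈ T then 1 else 0) := by
  induction T with
  | nil => simp
  | cons y ys ih =>
    have hnd' : ys.Nodup := hnd.of_cons
    have hy : y ∉ ys := (List.nodup_cons.mp hnd).1
    have IH := ih hnd'
    rw [List.filter_cons, List.filter_cons]
    by_cases h3 : y = k
    · subst h3
      rw [if_pos (show decide (y < y + 1) = true by simp),
        if_neg (show ¬ decide (y < y) = true by simp),
        if_pos (List.mem_cons_self : y ∈ y :: ys)]
      rw [if_neg hy] at IH
      simp only [List.length_cons]
      omega
    · have hmem : (k ∈ y :: ys) ↔ (k ∈ ys) := by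
        simp [List.mem_cons, Ne.symm h3]
      have hite : (if k ∈ y :: ys then 1 else 0) = (if k ∈ ys then 1 else 0) := by
        by_cases hk : k ∈ ys
        · rw [if_pos (hmem.mpr hk), if_pos hk]
        · rw [if_neg (fun h => hk (hmem.mp h)), if_neg hk]
      rw [hite]
      by_cases h2 : y < k
      · rw [if_pos (show decide (y < k + 1) = true by simp; omega),
          if_pos (show decide (y < k) = true by simp [h2])]
        simp only [List.length_cons]
        omega
      · rw [if_neg (show ¬ decide (y < k + 1) = true by simp; omega),
          if_neg (show ¬ decide (y < k) = true by simp [h2])]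
        omega

-- the main bridge: the fused counter recursion on a suffix equals B's closed form on the tail range
theorem go_eq_alt_suffix (s t f : List Int) (m k : Nat) (hm : m = s.length - k)
    (hk : k ≤ s.length) :
    pvGo t f (s.drop k) (k : Int)
      ((k : Int) - (((pvTiledSet s t).filter (fun x => decide (x < (k : Int)))).length : Int))
    = ((PySem.List.pyRange (k : Int) (s.length : Int) 1).filter
        (fun i => !(PySem.Set.contains (pvTiledSet s t) i))).map
      (fun i =>
        if PySem.Set.contains (PySem.Set.ofList f)
            (i - (((pvTiledSet s t).filter (fun x => decide (x < i))).length : Int))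
        then 1 else PySem.List.pyGetD s i 0) := by
  induction m generalizing k with
  | zero =>
    have hk' : k = s.length := by omega
    subst hk'
    simp [pvGo, PySem.List.pyRange_one_eq_nil (le_refl _)]
  | succ m ih =>
    have hklt : k < s.length := by omega
    have hkltI : (k : Int) < (s.length : Int) := by exact_mod_cast hklt
    have hdrop := List.drop_eq_getElem_cons hklt
    rw [hdrop, PySem.List.pyRange_one_cons hkltI]
    have hcast : ((k : Int) + 1) = ((k + 1 : Nat) : Int) := by push_cast; ring
    have hrank := rank_step (pvTiledSet s t) (PySem.Set.nodup_ofList _) (k : Int)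
    rw [hcast] at hrank
    have hmemset : ((k : Int) ∈ pvTiledSet s t) ↔ ((k : Int) ∈ t) :=
      mem_tiledSet s t (k : Int) (by positivity) hkltI
    have hget : PySem.List.pyGetD s (k : Int) 0 = s[k] := by
      rw [PySem.List.pyGetD_eq_getElem s 0 (by positivity) hkltI]
      simp
    have ihk := ih (k + 1) (by omega) (by omega)
    simp only [PySem.Set.contains_eq_listContains, List.contains_eq_mem] at ihk ⊢
    by_cases hmem : (k : Int) ∈ t
    · -- tiled index: skipped on both sides
      have hmem' : (k : Int) ∈ pvTiledSet s t := hmemset.mpr hmem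
      rw [if_pos hmem'] at hrank
      simp only [pvGo, hmem, if_true, List.filter_cons, hmem', decide_true,
        Bool.not_true, Bool.false_eq_true, if_false]
      have harg : (k : Int)
            - (((pvTiledSet s t).filter (fun x => decide (x < (k : Int)))).length : Int)
          = ((k + 1 : Nat) : Int)
            - (((pvTiledSet s t).filter (fun x => decide (x < ((k + 1 : Nat) : Int)))).length : Int) := by
        omega
      rw [hcast, harg]
      exact ihk
    · -- kept index: emitted on both sides
      have hmem' : (k : Int) ∉ pvTiledSet s t := fun h => hmem (hmemset.mp h)
      rw [if_neg hmem'] at hrank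
      simp only [pvGo, hmem, if_false, List.filter_cons, hmem', decide_false,
        Bool.not_false, if_true, List.map_cons]
      congr 1
      · by_cases hf : ((k : Int)
            - (((pvTiledSet s t).filter (fun x => decide (x < (k : Int)))).length : Int)) ∈ f
        · rw [if_pos hf, if_pos (by simpa [PySem.Set.mem_ofList] using hf)]
        · rw [if_neg hf, if_neg (by simpa [PySem.Set.mem_ofList] using hf), hget]
      · have harg : (k : Int)
              - (((pvTiledSet s t).filter (fun x => decide (x < (k : Int)))).length : Int) + 1
            = ((k + 1 : Nat) : Int)
              - (((pvTiledSet s t).filter (fun x => decide (x < ((k + 1 : Nat) : Int)))).length : Int) := by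
          omega
        rw [hcast, harg]
        exact ihk

-- ===== VERDICT (by name: the statement is the Claim_ definition above) =====
theorem get_quant_shape_py_spec : Claim_equal_get_quant_shape_py := by
  intro s t f _
  show get_quant_shape_py s t f = get_quant_shape_py_alt s t f
  have hzero : (pvTiledSet s t).filter (fun x => decide (x < (0 : Int))) = [] := by
    apply List.filter_eq_nil_iff.mpr
    intro x hx
    have hx' : x ∈ t ∧ 0 ≤ x ∧ x < (s.length : Int) := by
      simpa [pvTiledSet, PySem.Set.mem_ofList, List.mem_filter] using hx
    simp
    omega
  have h0 := go_eq_alt_suffix s t f s.length 0 (by omega) (Nat.zero_le _)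
  simp only [Nat.cast_zero, List.drop_zero] at h0
  rw [hzero] at h0
  simp only [List.length_nil, Nat.cast_zero, sub_zero] at h0
  simp only [get_quant_shape_py, get_quant_shape_py_alt, foldl_filt, foldl_mp,
    List.nil_append, mp_filt_eq_go]
  exact h0
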